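-- pv_equiv track=rewrite | github.com/Mial42/NQueens | NQueens.py | generate_middle_weighted_list
-- ===== SOURCE A (Python) =====
-- def generate_middle_weighted_list(state): #What if I made it so that the last-moved conflicter couldn't be moved again?
--     size = len(state) - 1
--     ans = []
--     for x in range(size // 2 + 1):
--         ans.append(x)
--         ans.append(size - x)
--     ans = ans[::-1]
--     if size % 2 == 0:
--         ans = ans[1:]
--     return ans
-- ===== SOURCE B (Python) =====
-- def generate_middle_weighted_list(state):
--     # Center-outward construction: start at the middle index and alternate
--     # outward (+/-) until len(state) indices are emitted; no reverse/trim.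
--     n = len(state)
--     if n == 0:
--         return []
--     c = n // 2
--     sign = 1 if n % 2 == 1 else -1
--     ans = [c]
--     k = 1
--     while len(ans) < n:
--         ans.append(c + sign * k)
--         if len(ans) < n:
--             ans.append(c - sign * k)
--         k += 1
--     return ans
-- ===== Notes on version B (the rewrite author's own statement) =====
-- stated objective: alternative
-- what changed: B builds the ordering directly center-outward (start at the middle index, alternate +/- with a growing offset until len(state) elements are emitted) instead of A's build-interleaved-pairs-then-reverse-and-trim pass.
import Mathlib
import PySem

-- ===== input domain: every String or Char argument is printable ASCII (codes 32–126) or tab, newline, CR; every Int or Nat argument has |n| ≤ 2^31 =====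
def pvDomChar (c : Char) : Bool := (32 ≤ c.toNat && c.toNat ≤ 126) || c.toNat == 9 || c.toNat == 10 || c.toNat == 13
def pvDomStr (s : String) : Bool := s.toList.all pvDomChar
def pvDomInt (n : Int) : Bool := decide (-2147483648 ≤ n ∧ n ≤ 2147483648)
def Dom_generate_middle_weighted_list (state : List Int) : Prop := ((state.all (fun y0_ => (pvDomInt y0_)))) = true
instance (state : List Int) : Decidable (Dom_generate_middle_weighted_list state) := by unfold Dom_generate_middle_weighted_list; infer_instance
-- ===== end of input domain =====

-- B builds the ordering directly center-outward instead of A's interleaved pairs + reverse + trim.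

-- ===== PORT A =====
def generate_middle_weighted_list (state : List Int) : List Int :=
  let size : Int := (state.length : Int) - 1
  let ans : List Int :=
    (PySem.List.pyRange 0 (PySem.Int.floordiv size 2 + 1) 1).foldl
      (fun ans x => (ans ++ [x]) ++ [size - x]) []
  let ans := ans.reverse            -- ans[::-1]  (PySem.List.slice?_none_none_neg_one: exactly reverse)
  if PySem.Int.mod size 2 = 0 then ans.tail else ans   -- ans[1:]  (PySem.List.slice_from_one: exactly tail)

-- ===== PORT B =====
-- the while loop of Source B; fuel bounds the iteration count (each iteration grows acc, n iterations suffice)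
def genAltLoop (n : Nat) : Nat → Int → Int → Int → List Int → List Int
  | 0, _, _, _, acc => acc
  | fuel+1, c, sign, k, acc =>
    if acc.length < n then
      let acc1 := acc ++ [c + sign * k]
      let acc2 := if acc1.length < n then acc1 ++ [c - sign * k] else acc1
      genAltLoop n fuel c sign (k+1) acc2
    else acc

def generate_middle_weighted_list_alt (state : List Int) : List Int :=
  let n := state.length
  if n = 0 then []
  else
    let c : Int := ((n / 2 : Nat) : Int)
    let sign : Int := if n % 2 = 1 then 1 else -1
    genAltLoop n n c sign 1 [c]

-- ===== PRECONDITION & SPEC =====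
def Spec_generate_middle_weighted_list (state : List Int) (out : List Int) : Prop := out = generate_middle_weighted_list_alt state
instance (state : List Int) (out : List Int) : Decidable (Spec_generate_middle_weighted_list state out) := by unfold Spec_generate_middle_weighted_list; infer_instance

-- ===== CLAIM (what is proved, stated in full; the proofs are below) =====
def Claim_equal_generate_middle_weighted_list : Prop := ∀ (state : List Int), Dom_generate_middle_weighted_list state → Spec_generate_middle_weighted_list state (generate_middle_weighted_list state)

-- ===== LEMMAS AND PROOFS =====

-- Both ports depend on the input only through its length.
def Aof (n : Nat) : List Int :=
  if PySem.Int.mod ((n : Int) - 1) 2 = 0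
  then (((PySem.List.pyRange 0 (PySem.Int.floordiv ((n : Int) - 1) 2 + 1) 1).foldl
      (fun ans x => (ans ++ [x]) ++ [((n : Int) - 1) - x]) []).reverse).tail
  else ((PySem.List.pyRange 0 (PySem.Int.floordiv ((n : Int) - 1) 2 + 1) 1).foldl
      (fun ans x => (ans ++ [x]) ++ [((n : Int) - 1) - x]) []).reverse

def Bof (n : Nat) : List Int :=
  if n = 0 then []
  else
    let c : Int := ((n / 2 : Nat) : Int)
    let sign : Int := if n % 2 = 1 then 1 else -1
    genAltLoop n n c sign 1 [c]

theorem A_eq_Aof (state : List Int) : generate_middle_weighted_list state = Aof state.length := rfl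

theorem B_eq_Bof (state : List Int) : generate_middle_weighted_list_alt state = Bof state.length := rfl

-- A-side: the interleaved pair list
def pairs (s : Int) : Nat → List Int
  | 0 => []
  | m+1 => pairs s m ++ [(m : Int), s - (m : Int)]

theorem pairs_ne_nil (s : Int) (m : Nat) (hm : 1 ≤ m) : pairs s m ≠ [] := by
  match m, hm with
  | m + 1, _ => simp [pairs]

theorem foldl_pairs (s : Int) : ∀ (m : Nat) (acc : List Int),
    ((List.range m).map (Nat.cast : Nat → Int)).foldl
      (fun ans x => (ans ++ [x]) ++ [s - x]) acc = acc ++ pairs s m := by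
  intro m
  induction m with
  | zero => intro acc; simp [pairs]
  | succ m ih =>
    intro acc
    rw [List.range_succ, List.map_append, List.foldl_append, ih]
    simp [pairs]

theorem Aof_eq_pairs (n : Nat) :
    Aof n =
      if PySem.Int.mod ((n : Int) - 1) 2 = 0
      then ((pairs ((n : Int) - 1) (PySem.Int.floordiv ((n : Int) - 1) 2 + 1).toNat).reverse).tail
      else (pairs ((n : Int) - 1) (PySem.Int.floordiv ((n : Int) - 1) 2 + 1).toNat).reverse := by
  unfold Aof
  rw [PySem.List.pyRange_one]
  have h : (List.range (PySem.Int.floordiv ((n : Int) - 1) 2 + 1 - 0).toNat).map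
        (fun k : Nat => (0 : Int) + (k : Int))
      = (List.range (PySem.Int.floordiv ((n : Int) - 1) 2 + 1).toNat).map (Nat.cast : Nat → Int) := by
    simp
  rw [h, foldl_pairs]
  simp

theorem pairs_step (s : Int) (m : Nat) :
    pairs (s + 2) (m + 1) = [0, s + 2] ++ (pairs s m).map (· + 1) := by
  induction m with
  | zero => simp [pairs]
  | succ m ih =>
    rw [show pairs (s + 2) (m + 1 + 1) = pairs (s + 2) (m + 1) ++ [((m + 1 : Nat) : Int), s + 2 - ((m + 1 : Nat) : Int)] from rfl,
        ih,
        show pairs s (m + 1) = pairs s m ++ [(m : Int), s - (m : Int)] from rfl]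
    simp only [List.map_append, List.map_cons, List.map_nil, List.cons_append,
      List.nil_append]
    congr 1
    have e1 : ((m + 1 : Nat) : Int) = (m : Int) + 1 := by push_cast; ring
    rw [e1]
    have e2 : s + 2 - ((m : Int) + 1) = s - (m : Int) + 1 := by ring
    rw [e2]

theorem stepA (n : Nat) : Aof (n + 2) = (Aof n).map (· + 1) ++ [(n : Int) + 1, 0] := by
  rw [Aof_eq_pairs, Aof_eq_pairs]
  have hs : ((n + 2 : Nat) : Int) - 1 = ((n : Int) - 1) + 2 := by push_cast; ring
  rw [hs]
  have hmod : PySem.Int.mod (((n : Int) - 1) + 2) 2 = PySem.Int.mod ((n : Int) - 1) 2 := by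
    rw [PySem.Int.mod_eq_emod_of_pos (by omega), PySem.Int.mod_eq_emod_of_pos (by omega)]
    omega
  have hdiv : (PySem.Int.floordiv (((n : Int) - 1) + 2) 2 + 1).toNat
      = (PySem.Int.floordiv ((n : Int) - 1) 2 + 1).toNat + 1 := by
    rw [PySem.Int.floordiv_eq_ediv_of_pos (by omega),
        PySem.Int.floordiv_eq_ediv_of_pos (by omega)]
    omega
  rw [hmod, hdiv, pairs_step]
  set m := (PySem.Int.floordiv ((n : Int) - 1) 2 + 1).toNat with hm
  set s := (n : Int) - 1 with hsdef
  rw [List.reverse_append]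
  have hrev2 : ([0, s + 2] : List Int).reverse = [s + 2, 0] := rfl
  rw [hrev2, ← List.map_reverse]
  have hlast : s + 2 = (n : Int) + 1 := by rw [hsdef]; ring
  by_cases hpar : PySem.Int.mod s 2 = 0
  · rw [if_pos hpar, if_pos hpar]
    -- s even → n odd → m ≥ 1, so the reversed pair list is nonempty
    have hm1 : 1 ≤ m := by
      rw [hm, PySem.Int.floordiv_eq_ediv_of_pos (by omega)]
      rw [PySem.Int.mod_eq_emod_of_pos (by omega)] at hpar
      omega
    have hne : ((pairs s m).reverse).map (· + 1) ≠ [] := by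
      simp [pairs_ne_nil s m hm1]
    rw [List.tail_append_of_ne_nil hne, ← List.map_tail, hlast]
  · rw [if_neg hpar, if_neg hpar, hlast]

-- B-side: the alternating stream and the loop's closed form
def stream : Nat → Int → Int → Int → List Int
  | 0, _, _, _ => []
  | f+1, c, s, k => (c + s * k) :: (c - s * k) :: stream f c s (k + 1)

theorem stream_snoc (c s : Int) : ∀ (j : Nat) (k : Int),
    stream (j + 1) c s k = stream j c s k ++ [c + s * (k + j), c - s * (k + j)] := by
  intro j
  induction j with
  | zero => intro k; simp [stream]
  | succ j ih =>
    intro k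
    have h1 : stream (j + 1 + 1) c s k = (c + s * k) :: (c - s * k) :: stream (j + 1) c s (k + 1) := rfl
    have h2 : stream (j + 1) c s k = (c + s * k) :: (c - s * k) :: stream j c s (k + 1) := rfl
    rw [h1, ih (k + 1), h2]
    push_cast
    have harg : k + 1 + (j : Int) = k + ((j : Int) + 1) := by ring
    rw [harg]
    simp

theorem stream_shift (c s : Int) : ∀ (f : Nat) (k : Int),
    stream f (c + 1) s k = (stream f c s k).map (· + 1) := by
  intro f
  induction f with
  | zero => intro k; simp [stream]
  | succ f ih =>
    intro k
    simp only [stream, ih (k + 1), List.map_cons, List.cons.injEq]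
    exact ⟨by ring, by ring, trivial⟩

theorem take_stream_even (c s : Int) : ∀ (j f : Nat) (k : Int), j ≤ f →
    (stream f c s k).take (2 * j) = stream j c s k := by
  intro j
  induction j with
  | zero => intro f k _; simp [stream]
  | succ j ih =>
    intro f k hj
    match f with
    | f + 1 =>
      simp only [stream]
      rw [show 2 * (j + 1) = (2 * j) + 1 + 1 from by ring]
      simp [List.take_succ_cons, ih f (k + 1) (by omega)]

theorem take_stream_odd (c s : Int) : ∀ (j f : Nat) (k : Int), j < f →
    (stream f c s k).take (2 * j + 1) = stream j c s k ++ [c + s * (k + j)] := by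
  intro j
  induction j with
  | zero =>
    intro f k hj
    match f with
    | f + 1 => simp [stream]
  | succ j ih =>
    intro f k hj
    match f with
    | f + 1 =>
      simp only [stream]
      rw [show 2 * (j + 1) + 1 = (2 * j + 1) + 1 + 1 from by ring]
      rw [List.take_succ_cons, List.take_succ_cons, ih f (k + 1) (by omega)]
      push_cast
      have harg : k + 1 + (j : Int) = k + ((j : Int) + 1) := by ring
      rw [harg]
      simp

theorem genAltLoop_eq (n : Nat) : ∀ (fuel : Nat) (c s k : Int) (acc : List Int),
    n ≤ acc.length + 2 * fuel →
    genAltLoop n fuel c s k acc = acc ++ (stream fuel c s k).take (n - acc.length) := by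
  intro fuel
  induction fuel with
  | zero =>
    intro c s k acc h
    simp [genAltLoop, stream, Nat.sub_eq_zero_of_le (show n ≤ acc.length from by omega)]
  | succ fuel ih =>
    intro c s k acc h
    simp only [genAltLoop]
    by_cases h1 : acc.length < n
    · simp only [if_pos h1]
      by_cases h2 : (acc ++ [c + s * k]).length < n
      · simp only [if_pos h2]
        simp only [List.length_append, List.length_cons, List.length_nil] at h2
        rw [ih c s (k + 1) _ (by
          simp only [List.length_append, List.length_cons, List.length_nil]; omega)]
        have h3 : (acc ++ [c + s * k] ++ [c - s * k]).length = acc.length + 2 := by simp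
        rw [h3]
        obtain ⟨t, ht⟩ : ∃ t, n - acc.length = t + 2 := ⟨n - acc.length - 2, by omega⟩
        have ht2 : n - (acc.length + 2) = t := by omega
        rw [ht, ht2,
            show stream (fuel + 1) c s k = (c + s * k) :: (c - s * k) :: stream fuel c s (k + 1) from rfl,
            List.take_succ_cons, List.take_succ_cons]
        simp
      · simp only [if_neg h2]
        simp only [List.length_append, List.length_cons, List.length_nil] at h2
        rw [ih c s (k + 1) _ (by
          simp only [List.length_append, List.length_cons, List.length_nil]; omega)]
        have h3 : n - (acc ++ [c + s * k]).length = 0 := by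
          simp only [List.length_append, List.length_cons, List.length_nil]; omega
        have h4 : n - acc.length = 1 := by omega
        rw [h3, h4,
            show stream (fuel + 1) c s k = (c + s * k) :: (c - s * k) :: stream fuel c s (k + 1) from rfl,
            List.take_succ_cons]
        simp
    · simp only [if_neg h1]
      rw [Nat.sub_eq_zero_of_le (by omega)]
      simp

theorem Bof_closed (n : Nat) (hn : 1 ≤ n) :
    Bof n = ((n / 2 : Nat) : Int) ::
      (stream n ((n / 2 : Nat) : Int) (if n % 2 = 1 then 1 else -1) 1).take (n - 1) := by
  unfold Bof
  rw [if_neg (by omega)]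
  rw [genAltLoop_eq n n _ _ 1 _ (by simp; omega)]
  simp

theorem stepB (n : Nat) (hn : 1 ≤ n) :
    Bof (n + 2) = (Bof n).map (· + 1) ++ [(n : Int) + 1, 0] := by
  rw [Bof_closed n hn, Bof_closed (n + 2) (by omega)]
  have hc : (((n + 2) / 2 : Nat) : Int) = ((n / 2 : Nat) : Int) + 1 := by
    have h : (n + 2) / 2 = n / 2 + 1 := by omega
    rw [h]; push_cast; ring
  have hpar : (n + 2) % 2 = n % 2 := by omega
  rw [hc, hpar, stream_shift]
  rcases Nat.even_or_odd n with ⟨m, hm⟩ | ⟨m, hm⟩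
  · -- n = 2m even, m ≥ 1, sign = -1
    obtain ⟨m', rfl⟩ : ∃ m', m = m' + 1 := ⟨m - 1, by omega⟩
    have hnd : n / 2 = m' + 1 := by omega
    rw [hnd, if_neg (by omega : ¬ n % 2 = 1), ← List.map_take]
    have h1 : (stream (n + 2) (((m' + 1 : Nat) : Int)) (-1) 1).take (n + 2 - 1)
        = stream (m' + 1) ((m' + 1 : Nat) : Int) (-1) 1
          ++ [((m' + 1 : Nat) : Int) + (-1) * (1 + ((m' + 1 : Nat) : Int))] := by
      rw [show n + 2 - 1 = 2 * (m' + 1) + 1 from by omega]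
      exact take_stream_odd _ _ (m' + 1) (n + 2) 1 (by omega)
    have h2 : (stream n (((m' + 1 : Nat) : Int)) (-1) 1).take (n - 1)
        = stream m' ((m' + 1 : Nat) : Int) (-1) 1
          ++ [((m' + 1 : Nat) : Int) + (-1) * (1 + ((m' : Nat) : Int))] := by
      rw [show n - 1 = 2 * m' + 1 from by omega]
      exact take_stream_odd _ _ m' n 1 (by omega)
    rw [h1, h2, stream_snoc _ _ m' 1]
    have e1 : ((m' + 1 : Nat) : Int) + (-1) * (1 + ((m' : Nat) : Int)) = 0 := by push_cast; ring
    have e2 : ((m' + 1 : Nat) : Int) - (-1) * (1 + ((m' : Nat) : Int)) = (n : Int) := by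
      subst hm; push_cast; ring
    have e3 : ((m' + 1 : Nat) : Int) + (-1) * (1 + ((m' + 1 : Nat) : Int)) = -1 := by
      push_cast; ring
    rw [e1, e2, e3]
    simp [List.map_append]
  · -- n = 2m+1 odd, sign = 1
    have hnd : n / 2 = m := by omega
    rw [hnd, if_pos (by omega : n % 2 = 1), ← List.map_take]
    have h1 : (stream (n + 2) ((m : Nat) : Int) 1 1).take (n + 2 - 1)
        = stream (m + 1) (m : Int) 1 1 := by
      rw [show n + 2 - 1 = 2 * (m + 1) from by omega]
      exact take_stream_even _ _ (m + 1) (n + 2) 1 (by omega)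
    have h2 : (stream n ((m : Nat) : Int) 1 1).take (n - 1)
        = stream m (m : Int) 1 1 := by
      rw [show n - 1 = 2 * m from by omega]
      exact take_stream_even _ _ m n 1 (by omega)
    rw [h1, h2, stream_snoc _ _ m 1]
    have e1 : ((m : Nat) : Int) + 1 * (1 + ((m : Nat) : Int)) = (n : Int) := by push_cast [hm]; ring
    have e2 : ((m : Nat) : Int) - 1 * (1 + ((m : Nat) : Int)) = -1 := by ring
    rw [e1, e2]
    simp [List.map_append]

theorem Aof_eq_Bof : ∀ n : Nat, Aof n = Bof n := by
  intro n
  induction n using Nat.strong_induction_on with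
  | _ n ih =>
    match n with
    | 0 => decide
    | 1 => decide
    | 2 => decide
    | (k + 3) =>
      rw [show k + 3 = (k + 1) + 2 from rfl, stepA, stepB (k + 1) (by omega),
          ih (k + 1) (by omega)]

-- ===== VERDICT (by name: the statement is the Claim_ definition above) =====
theorem generate_middle_weighted_list_spec : Claim_equal_generate_middle_weighted_list := by
  intro state _
  unfold Spec_generate_middle_weighted_list
  rw [A_eq_Aof, B_eq_Bof, Aof_eq_Bof]
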